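-- pv_equiv track=rewrite | github.com/divyansh10011/prayogam1 | safe.py | get_rescan_schedule_hours
-- ===== SOURCE A (Python) =====
-- def get_rescan_schedule_hours(initial_scan_utc_hour: int) -> list:
--     """
--     Returns a list of UTC hours for re-scans. Strategy:
--     - T+8h, T+20h, T+32h, T+48h, T+60h, T+72h
--     - Also includes target business-hour windows for US-East (UTC 14-18),
--       EU-West (UTC 8-12), and APAC (UTC 0-4) attack peaks.
--     Always varies from fixed scan time to defeat time-gated payloads.
--     """
--     business_hour_targets = [2, 9, 14, 16]  # Cover all major timezone attack windows
--     offsets = [8, 20, 32, 48, 60, 72]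
--     schedule_hours = []
--     for offset in offsets:
--         raw = (initial_scan_utc_hour + offset) % 24
--         # Snap to nearest business-hour target if within 3 hours
--         adjusted = min(business_hour_targets, key=lambda bh: min(abs(bh - raw), 24 - abs(bh - raw)))
--         schedule_hours.append({"utc_hour": adjusted, "offset_hours": offset})
--     return schedule_hours
-- ===== SOURCE B (Python) =====
-- def get_rescan_schedule_hours(initial_scan_utc_hour: int) -> list:
--     targets = [2, 9, 14, 16]
--     # Precompute the snapped hour for each of the 24 possible raw hours,
--     # replicating min()'s first-minimum tie-breaking with an explicit scan.
--     snap = []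
--     for h in range(24):
--         best, best_key = targets[0], None
--         for bh in targets:
--             d = abs(bh - h)
--             k = d if d < 24 - d else 24 - d
--             if best_key is None or k < best_key:
--                 best, best_key = bh, k
--         snap.append(best)
--     return [{"utc_hour": snap[(initial_scan_utc_hour + off) % 24], "offset_hours": off}
--             for off in [8, 20, 32, 48, 60, 72]]
-- ===== Notes on version B (the rewrite author's own statement) =====
-- stated objective: alternative
-- what changed: B precomputes a 24-entry lookup table of snapped business hours once and maps the offsets through it, instead of re-running the keyed min over the targets for every offset.
import Mathlib
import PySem

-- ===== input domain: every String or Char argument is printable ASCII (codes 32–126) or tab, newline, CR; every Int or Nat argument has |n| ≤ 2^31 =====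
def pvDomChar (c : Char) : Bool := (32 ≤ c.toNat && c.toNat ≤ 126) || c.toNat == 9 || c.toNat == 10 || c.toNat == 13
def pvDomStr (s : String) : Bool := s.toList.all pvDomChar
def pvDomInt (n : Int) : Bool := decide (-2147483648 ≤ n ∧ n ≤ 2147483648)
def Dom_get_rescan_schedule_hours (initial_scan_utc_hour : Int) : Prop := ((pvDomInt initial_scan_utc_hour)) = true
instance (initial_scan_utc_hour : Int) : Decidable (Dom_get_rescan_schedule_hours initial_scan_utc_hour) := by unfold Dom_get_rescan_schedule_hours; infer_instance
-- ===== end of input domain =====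

-- B replaces the per-offset keyed min over the targets by a precomputed 24-entry
-- snap table indexed by the raw hour (objective: alternative structure, same cost class).

-- ===== PORT A =====
def get_rescan_schedule_hours (initial_scan_utc_hour : Int) : List (List (String × Int)) :=
  let business_hour_targets : List Int := [2, 9, 14, 16]
  let offsets : List Int := [8, 20, 32, 48, 60, 72]
  offsets.foldl (fun schedule_hours offset =>
    let raw := PySem.Int.mod (initial_scan_utc_hour + offset) 24
    -- Python's min(list, key=...) raises only on an empty list; the target list is a
    -- nonempty literal, so .getD 0 is never reached with the default.
    let adjusted := (PySem.List.min? business_hour_targets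
        (fun bh => min |bh - raw| (24 - |bh - raw|))).getD 0
    schedule_hours ++ [[("utc_hour", adjusted), ("offset_hours", offset)]]) []

-- ===== PORT B =====
-- inner scan of Source B: explicit first-minimum over the targets with an Option accumulator
def pvSnapOne (h : Int) : Int :=
  (([2, 9, 14, 16] : List Int).foldl
    (fun (best : Int × Option Int) bh =>
      let d := |bh - h|
      let k := if d < 24 - d then d else 24 - d
      match best.2 with
      | none => (bh, some k)
      | some bk => if k < bk then (bh, some k) else best)
    (2, none)).1

def pvSnapTable : List Int := (PySem.List.pyRange 0 24 1).map pvSnapOne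

def get_rescan_schedule_hours_alt (initial_scan_utc_hour : Int) : List (List (String × Int)) :=
  ([8, 20, 32, 48, 60, 72] : List Int).map (fun off =>
    -- snap[(initial+off) % 24]: the index is always in range, so getD 0 is never the default
    [("utc_hour", (PySem.List.pyGet? pvSnapTable (PySem.Int.mod (initial_scan_utc_hour + off) 24)).getD 0),
     ("offset_hours", off)])

-- ===== PRECONDITION & SPEC =====
def Spec_get_rescan_schedule_hours (initial_scan_utc_hour : Int) (out : List (List (String × Int))) : Prop := out = get_rescan_schedule_hours_alt initial_scan_utc_hour
instance (initial_scan_utc_hour : Int) (out : List (List (String × Int))) : Decidable (Spec_get_rescan_schedule_hours initial_scan_utc_hour out) := by unfold Spec_get_rescan_schedule_hours; infer_instance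

-- ===== CLAIM (what is proved, stated in full; the proofs are below) =====
def Claim_equal_get_rescan_schedule_hours : Prop := ∀ (initial_scan_utc_hour : Int), Dom_get_rescan_schedule_hours initial_scan_utc_hour → Spec_get_rescan_schedule_hours initial_scan_utc_hour (get_rescan_schedule_hours initial_scan_utc_hour)

-- ===== LEMMAS AND PROOFS =====
lemma pv_mod_shift (n c : Int) :
    PySem.Int.mod (n + c) 24 = PySem.Int.mod (PySem.Int.mod n 24 + c) 24 := by
  have h24 : (0:Int) < 24 := by norm_num
  simp only [PySem.Int.mod_eq_emod_of_pos h24]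
  omega

lemma pvA_mod (n : Int) :
    get_rescan_schedule_hours n = get_rescan_schedule_hours (PySem.Int.mod n 24) := by
  simp only [get_rescan_schedule_hours, List.foldl]
  rw [pv_mod_shift n 8, pv_mod_shift n 20, pv_mod_shift n 32,
      pv_mod_shift n 48, pv_mod_shift n 60, pv_mod_shift n 72]

lemma pvB_mod (n : Int) :
    get_rescan_schedule_hours_alt n = get_rescan_schedule_hours_alt (PySem.Int.mod n 24) := by
  simp only [get_rescan_schedule_hours_alt, List.map]
  rw [pv_mod_shift n 8, pv_mod_shift n 20, pv_mod_shift n 32,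
      pv_mod_shift n 48, pv_mod_shift n 60, pv_mod_shift n 72]

-- ===== VERDICT (by name: the statement is the Claim_ definition above) =====
theorem get_rescan_schedule_hours_spec : Claim_equal_get_rescan_schedule_hours := by
  intro n _
  unfold Spec_get_rescan_schedule_hours
  rw [pvA_mod, pvB_mod]
  have h0 : 0 ≤ PySem.Int.mod n 24 := PySem.Int.mod_nonneg n (by norm_num)
  have h1 : PySem.Int.mod n 24 < 24 := PySem.Int.mod_lt n (by norm_num)
  set m := PySem.Int.mod n 24 with hm
  clear_value m
  interval_cases m <;> decide
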